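-- pv_equiv track=rewrite | github.com/washing1127/LeetCode | Solutions/1252/1252.py | oddCells
-- ===== SOURCE A (Python) =====
-- from typing import List
--
-- def oddCells(m: int, n: int, indices: List[List[int]]) -> int:
--     sc = set()
--     sr = set()
--     for c, r in indices:
--         if c in sc: sc.remove(c)
--         else: sc.add(c)
--         if r in sr: sr.remove(r)
--         else: sr.add(r)
--     return len(sc) * n - len(sc) * len(sr) + (m - len(sc)) * len(sr)
-- ===== SOURCE B (Python) =====
-- def _odd_distinct(xs):
--     # brute force: count values whose total multiplicity in xs is odd,
--     # detecting each value at its first occurrence via a linear scan of 'seen'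
--     a = 0
--     seen = []
--     for x in xs:
--         if x not in seen and xs.count(x) % 2 == 1:
--             a += 1
--         seen.append(x)
--     return a
--
-- def oddCells(m, n, indices):
--     rows = [c for c, r in indices]
--     cols = [r for c, r in indices]
--     a = _odd_distinct(rows)
--     b = _odd_distinct(cols)
--     return a * n + b * m - 2 * a * b
-- ===== Notes on version B (the rewrite author's own statement) =====
-- stated objective: alternative
-- what changed: A streams pairs through two parity-toggle sets and sizes them; B splits indices into row/col coordinate lists and, with no maintained parity state, counts odd-multiplicity values by brute force (first-occurrence detection via a linear 'seen' scan plus a full-list .count per element), combining them as a*n + b*m - 2*a*b.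
import Mathlib
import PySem

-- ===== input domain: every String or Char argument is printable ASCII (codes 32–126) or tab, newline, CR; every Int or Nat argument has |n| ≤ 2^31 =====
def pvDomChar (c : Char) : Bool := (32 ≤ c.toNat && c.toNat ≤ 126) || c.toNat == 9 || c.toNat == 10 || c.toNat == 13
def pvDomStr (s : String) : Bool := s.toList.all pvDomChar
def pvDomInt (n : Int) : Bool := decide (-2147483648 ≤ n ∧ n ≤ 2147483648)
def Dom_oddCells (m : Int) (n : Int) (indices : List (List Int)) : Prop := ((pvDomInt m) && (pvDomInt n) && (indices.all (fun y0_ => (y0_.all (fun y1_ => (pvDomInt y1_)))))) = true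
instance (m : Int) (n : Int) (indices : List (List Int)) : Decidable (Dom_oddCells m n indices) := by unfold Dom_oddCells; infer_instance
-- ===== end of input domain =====

-- B drops A's streaming parity-toggle sets: it splits the pairs into row/col coordinate lists and
-- counts odd-multiplicity values by brute force (first-occurrence scan + full-list count per
-- element), combining them as a*n + b*m - 2*a*b (objective: alternative, not faster).

-- ===== PORT A =====
-- toggle of Python's "if c in sc: sc.remove(c) else: sc.add(c)"
def pvToggle (s : PySem.Set Int) (x : Int) : PySem.Set Int :=
  if PySem.Set.contains s x then (PySem.Set.remove? s x).getD s else PySem.Set.add s x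

-- loop body of "for c, r in indices"; a row that is not a pair raises in Python (outside Pre_)
def pvStepA (st : PySem.Set Int × PySem.Set Int) (p : List Int) :
    PySem.Set Int × PySem.Set Int :=
  match p with
  | [c, r] => (pvToggle st.1 c, pvToggle st.2 r)
  | _ => st

def oddCells (m : Int) (n : Int) (indices : List (List Int)) : Int :=
  let st := indices.foldl pvStepA (PySem.Set.empty, PySem.Set.empty)
  (st.1.length : Int) * n - (st.1.length : Int) * (st.2.length : Int)
    + (m - (st.1.length : Int)) * (st.2.length : Int)

-- ===== PORT B =====
-- "[c for c, r in indices]" / "[r for c, r in indices]"; non-pairs raise in Python (outside Pre_)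
def pvFst (p : List Int) : Int := match p with | [c, _] => c | _ => 0
def pvSnd (p : List Int) : Int := match p with | [_, r] => r | _ => 0

-- helper _odd_distinct: loop over xs with state (a, seen); "x not in seen and xs.count(x) % 2 == 1"
def pvOddDistinct (xs : List Int) : Int :=
  (xs.foldl
    (fun st x =>
      (if !(st.2.contains x) && (PySem.Int.mod ((xs.count x : Nat) : Int) 2 == 1)
       then st.1 + 1 else st.1,
       st.2 ++ [x]))
    ((0 : Int), ([] : List Int))).1

def oddCells_alt (m : Int) (n : Int) (indices : List (List Int)) : Int :=
  let rows := indices.map pvFst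
  let cols := indices.map pvSnd
  let a := pvOddDistinct rows
  let b := pvOddDistinct cols
  a * n + b * m - 2 * a * b

-- ===== PRECONDITION & SPEC =====
-- Pre_ excludes exactly the inputs where A raises (ValueError on unpacking): a row of indices
-- that is not a pair [c, r]. Nothing else is excluded.
def Pre_oddCells (m : Int) (n : Int) (indices : List (List Int)) : Prop :=
  ∀ p ∈ indices, p.length = 2
instance (m : Int) (n : Int) (indices : List (List Int)) : Decidable (Pre_oddCells m n indices) := by
  unfold Pre_oddCells; infer_instance

def pvWitness_oddCells : Int × Int × List (List Int) := (2, 3, [[0, 1], [1, 2], [0, 1]])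

def Spec_oddCells (m : Int) (n : Int) (indices : List (List Int)) (out : Int) : Prop :=
  out = oddCells_alt m n indices
instance (m : Int) (n : Int) (indices : List (List Int)) (out : Int) : Decidable (Spec_oddCells m n indices out) := by unfold Spec_oddCells; infer_instance

-- ===== CLAIM (what is proved, stated in full; the proofs are below) =====
def Claim_equal_oddCells : Prop := ∀ (m : Int) (n : Int) (indices : List (List Int)), Dom_oddCells m n indices → Pre_oddCells m n indices → Spec_oddCells m n indices (oddCells m n indices)

-- ===== LEMMAS AND PROOFS =====

-- the common yardstick: number of values of odd multiplicity in xs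
def pvOddCard (xs : List Int) : Nat :=
  (xs.toFinset.filter (fun k => xs.count k % 2 = 1)).card

lemma pvMod2 (v : Int) : PySem.Int.mod v 2 = v % 2 := by
  simp [PySem.Int.mod, Int.fmod_eq_emod]

lemma pvCond (xs : List Int) (x : Int) :
    (PySem.Int.mod ((xs.count x : Nat) : Int) 2 == 1) = true ↔ xs.count x % 2 = 1 := by
  rw [pvMod2, beq_iff_eq]
  omega

-- ---- A side: the toggle fold keeps exactly the odd-multiplicity values ----

lemma pvToggle_nodup (s : PySem.Set Int) (c : Int) (h : s.Nodup) : (pvToggle s c).Nodup := by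
  unfold pvToggle
  split
  · next hcon =>
    rw [PySem.Set.remove?_of_mem (by simpa [PySem.Set.contains_iff] using hcon)]
    exact PySem.Set.nodup_discard _ _ h
  · exact PySem.Set.nodup_add _ _ h

lemma pvToggle_mem (s : PySem.Set Int) (c x : Int) :
    x ∈ pvToggle s c ↔ ((x ∈ s ∧ x ≠ c) ∨ (x ∉ s ∧ x = c)) := by
  unfold pvToggle
  by_cases hcs : c ∈ s
  · rw [if_pos (by simpa [PySem.Set.contains_iff] using hcs),
      PySem.Set.remove?_of_mem hcs, Option.getD_some, PySem.Set.mem_discard]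
    constructor
    · exact fun h => Or.inl h
    · rintro (h | ⟨h1, h2⟩)
      · exact h
      · exact absurd (h2 ▸ hcs) h1
  · rw [if_neg (by simpa [PySem.Set.contains_iff] using hcs), PySem.Set.mem_add]
    constructor
    · rintro (h | h)
      · exact Or.inl ⟨h, fun he => hcs (he ▸ h)⟩
      · exact Or.inr ⟨fun hx => hcs (h ▸ hx), h⟩
    · rintro (⟨h, _⟩ | ⟨_, h⟩)
      · exact Or.inl h
      · exact Or.inr h

-- XOR invariant of the toggle fold
lemma pvToggleXor (xs : List Int) : ∀ (s : PySem.Set Int), s.Nodup →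
    (xs.foldl pvToggle s).Nodup ∧
    ∀ x : Int, x ∈ xs.foldl pvToggle s ↔ ((x ∈ s) ↔ ¬ (xs.count x % 2 = 1)) := by
  induction xs with
  | nil =>
    intro s hs
    refine ⟨hs, fun x => ?_⟩
    simp
  | cons y t ih =>
    intro s hs
    obtain ⟨h1, h2⟩ := ih (pvToggle s y) (pvToggle_nodup s y hs)
    refine ⟨h1, fun x => ?_⟩
    rw [List.foldl_cons, h2 x, pvToggle_mem, List.count_cons]
    have hcnt : ((t.count x + if (y == x) = true then 1 else 0) % 2 = 1) ↔
        (if x = y then ¬ (t.count x % 2 = 1) else t.count x % 2 = 1) := by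
      by_cases hxy : x = y
      · subst hxy
        simp
        omega
      · have hyx : ¬ y = x := fun h => hxy h.symm
        simp [beq_iff_eq, hyx, hxy]
    rw [hcnt]
    by_cases hxy : x = y
    · subst hxy
      rw [if_pos rfl]
      tauto
    · simp only [if_neg hxy]
      tauto

-- size of the toggled set = pvOddCard
lemma pvLenA (xs : List Int) :
    (xs.foldl pvToggle PySem.Set.empty).length = pvOddCard xs := by
  obtain ⟨hnd, hmem⟩ := pvToggleXor xs PySem.Set.empty List.nodup_nil
  have hset : (xs.foldl pvToggle PySem.Set.empty).toFinset =
      xs.toFinset.filter (fun k => xs.count k % 2 = 1) := by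
    apply Finset.ext
    intro k
    rw [List.mem_toFinset, hmem k, Finset.mem_filter, List.mem_toFinset]
    simp only [PySem.Set.empty, List.not_mem_nil, false_iff, not_not]
    constructor
    · intro h
      exact ⟨List.count_pos_iff.mp (by omega), h⟩
    · exact fun h => h.2
  rw [pvOddCard, ← hset, List.toFinset_card_of_nodup hnd]

-- the pair fold of A is the two independent single-set folds
lemma pvStepA_eq (l : List (List Int)) :
    ∀ (s r : PySem.Set Int), (∀ p ∈ l, p.length = 2) →
    l.foldl pvStepA (s, r) =
      (l.foldl (fun s p => pvToggle s (pvFst p)) s,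
       l.foldl (fun r p => pvToggle r (pvSnd p)) r) := by
  induction l with
  | nil => intro s r _; rfl
  | cons p t ih =>
    intro s r h
    have hA : pvStepA (s, r) p = (pvToggle s (pvFst p), pvToggle r (pvSnd p)) := by
      match p, h p List.mem_cons_self with
      | [a, b], _ => rfl
    rw [List.foldl_cons, List.foldl_cons, List.foldl_cons, hA,
      ih _ _ (fun q hq => h q (List.mem_cons_of_mem _ hq))]

-- ---- B side: the first-occurrence brute-force loop computes pvOddCard ----

lemma pvOddDistinct_aux (xs : List Int) : ∀ (t seen : List Int) (a : Int),
    (t.foldl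
      (fun st x =>
        (if !(st.2.contains x) && (PySem.Int.mod ((xs.count x : Nat) : Int) 2 == 1)
         then st.1 + 1 else st.1,
         st.2 ++ [x]))
      (a, seen)).1 =
    a + ((t.toFinset.filter (fun k => k ∉ seen ∧ xs.count k % 2 = 1)).card : Int) := by
  intro t
  induction t with
  | nil => intro seen a; simp
  | cons x t ih =>
    intro seen a
    simp only [List.toFinset_cons]
    rw [List.foldl_cons, ih]
    have hmemseen : (!(seen.contains x)) = true ↔ x ∉ seen := by
      simp
    have hF2 : t.toFinset.filter (fun k => k ∉ seen ++ [x] ∧ xs.count k % 2 = 1) =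
        ((insert x t.toFinset).filter (fun k => k ∉ seen ∧ xs.count k % 2 = 1)).erase x := by
      apply Finset.ext
      intro k
      simp only [Finset.mem_filter, Finset.mem_erase, Finset.mem_insert, List.mem_toFinset,
        List.mem_append, List.mem_singleton]
      constructor
      · rintro ⟨hk, hns, hodd⟩
        exact ⟨fun he => hns (Or.inr he), Or.inr hk, fun hs => hns (Or.inl hs), hodd⟩
      · rintro ⟨hne, hk | hk, hns, hodd⟩
        · exact absurd hk hne
        · exact ⟨hk, fun h => h.elim hns hne, hodd⟩
    by_cases hc : x ∉ seen ∧ xs.count x % 2 = 1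
    · have hcond : (!(seen.contains x) && (PySem.Int.mod ((xs.count x : Nat) : Int) 2 == 1)) = true := by
        rw [Bool.and_eq_true, hmemseen, pvCond]
        exact hc
      have hxF : x ∈ (insert x t.toFinset).filter (fun k => k ∉ seen ∧ xs.count k % 2 = 1) := by
        rw [Finset.mem_filter]
        exact ⟨Finset.mem_insert_self _ _, hc⟩
      rw [hcond, if_pos rfl, hF2, Finset.card_erase_of_mem hxF]
      have hpos : 0 < ((insert x t.toFinset).filter (fun k => k ∉ seen ∧ xs.count k % 2 = 1)).card :=
        Finset.card_pos.mpr ⟨x, hxF⟩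
      push_cast [Nat.cast_sub (by omega : 1 ≤ ((insert x t.toFinset).filter (fun k => k ∉ seen ∧ xs.count k % 2 = 1)).card)]
      ring
    · have hcond : (!(seen.contains x) && (PySem.Int.mod ((xs.count x : Nat) : Int) 2 == 1)) = false := by
        rw [Bool.eq_false_iff]
        intro h
        rw [Bool.and_eq_true, hmemseen, pvCond] at h
        exact hc h
      have hxF : x ∉ (insert x t.toFinset).filter (fun k => k ∉ seen ∧ xs.count k % 2 = 1) := by
        rw [Finset.mem_filter]
        exact fun h => hc h.2
      rw [hcond, hF2, Finset.erase_eq_of_notMem hxF]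
      have hset : (insert x t.toFinset).filter (fun k => k ∉ seen ∧ xs.count k % 2 = 1) =
          t.toFinset.filter (fun k => k ∉ seen ∧ xs.count k % 2 = 1) := by
        rw [Finset.filter_insert]
        exact if_neg (fun h => hc h)
      rw [hset]
      simp

lemma pvLenB (xs : List Int) : pvOddDistinct xs = (pvOddCard xs : Int) := by
  rw [pvOddDistinct, pvOddDistinct_aux xs xs [] 0, pvOddCard]
  simp

-- ===== VERDICT (by name: the statement is the Claim_ definition above) =====
theorem oddCells_spec : Claim_equal_oddCells := by
  intro m n indices _ hpre
  unfold Spec_oddCells oddCells oddCells_alt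
  rw [pvStepA_eq indices _ _ hpre]
  dsimp only
  rw [← List.foldl_map (f := pvFst) (g := pvToggle),
    ← List.foldl_map (f := pvSnd) (g := pvToggle),
    pvLenA, pvLenA, pvLenB, pvLenB]
  ring
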